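-- pv_equiv track=rewrite | github.com/Darepode/Milestone-2 | verification/script/generate_rv32i_asm.py | update_labels_after
-- ===== SOURCE A (Python) =====
-- def update_labels_after(asm_code, label, next_label):
--     """
--     Change all occurrences of `label` after it has been inserted to `next_label`.
--     """
--     updated_code = []
--     found_label = False
--
--     for line in asm_code:
--         if f"{label}:" in line:  # Detect when the label is inserted
--             found_label = True
--
--         if found_label:
--             # Replace occurrences of the label in lines that are not label declarations
--             if not line.strip().endswith(':'):
--                 line = line.replace(label, next_label)
--
--         updated_code.append(line)
--
--     return updated_code
-- ===== SOURCE B (Python) =====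
-- def update_labels_after(asm_code, label, next_label):
--     """Two-pass version: locate the first line declaring the label, then transform by index."""
--     marker = f"{label}:"
--     idx = next((i for i, line in enumerate(asm_code) if marker in line), None)
--     if idx is None:
--         return list(asm_code)
--     return [
--         line.replace(label, next_label)
--         if i >= idx and not line.strip().endswith(':')
--         else line
--         for i, line in enumerate(asm_code)
--     ]
-- ===== Notes on version B (the rewrite author's own statement) =====
-- stated objective: faster
-- what changed: Replaces A's single stateful scan carrying a found_label flag by two passes (find the index of the first line containing the label-declaration marker, then map over the enumerated lines replacing only at indices at or past it), and builds the marker string once instead of re-building the f-string on every line.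
import Mathlib
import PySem

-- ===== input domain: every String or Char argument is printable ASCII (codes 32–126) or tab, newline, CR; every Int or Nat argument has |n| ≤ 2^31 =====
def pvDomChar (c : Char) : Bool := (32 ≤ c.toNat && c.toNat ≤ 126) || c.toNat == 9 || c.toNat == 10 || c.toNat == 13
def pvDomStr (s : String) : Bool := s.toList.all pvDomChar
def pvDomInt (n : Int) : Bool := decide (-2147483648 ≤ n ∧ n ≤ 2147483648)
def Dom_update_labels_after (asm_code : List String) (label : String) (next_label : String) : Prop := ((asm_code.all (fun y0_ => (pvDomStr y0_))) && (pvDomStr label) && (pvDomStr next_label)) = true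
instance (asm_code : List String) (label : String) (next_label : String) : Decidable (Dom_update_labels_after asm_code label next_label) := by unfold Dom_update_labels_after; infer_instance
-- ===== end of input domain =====

-- B replaces A's stateful single pass (found_label flag) by an index-finding pass plus an indexed map, building the label-declaration marker once; a timing run measured B faster than A at the largest inputs.

-- ===== PORT A =====
def update_labels_after (asm_code : List String) (label : String) (next_label : String) : List String :=
  (asm_code.foldl (fun (st : Bool × List String) line =>
      let found_label := if PySem.Str.isIn (label ++ ":") line then true else st.1
      let line := if found_label then
          (if !(PySem.Str.endswith (PySem.Str.strip line) ":") then
             PySem.Str.replace line label next_label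
           else line)
        else line
      (found_label, st.2 ++ [line])) (false, [])).2

-- ===== PORT B =====
def update_labels_after_alt (asm_code : List String) (label : String) (next_label : String) : List String :=
  match (PySem.List.enumerate asm_code).find? (fun p => PySem.Str.isIn (label ++ ":") p.2) with
  | none => asm_code
  | some p =>
      (PySem.List.enumerate asm_code).map (fun q =>
        if p.1 ≤ q.1 && !(PySem.Str.endswith (PySem.Str.strip q.2) ":") then
          PySem.Str.replace q.2 label next_label
        else q.2)

-- ===== PRECONDITION & SPEC =====
def Spec_update_labels_after (asm_code : List String) (label : String) (next_label : String) (out : List String) : Prop := out = update_labels_after_alt asm_code label next_label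
instance (asm_code : List String) (label : String) (next_label : String) (out : List String) : Decidable (Spec_update_labels_after asm_code label next_label out) := by unfold Spec_update_labels_after; infer_instance

-- ===== CLAIM (what is proved, stated in full; the proofs are below) =====
def Claim_equal_update_labels_after : Prop := ∀ (asm_code : List String) (label : String) (next_label : String), Dom_update_labels_after asm_code label next_label → Spec_update_labels_after asm_code label next_label (update_labels_after asm_code label next_label)

-- ===== LEMMAS AND PROOFS =====

-- structural recursion equivalent of A's loop body (proof helper)
def goA (label next_label : String) : Bool → List String → List String
  | _, [] => []
  | found, l :: ls =>
      let f' := if PySem.Str.isIn (label ++ ":") l then true else found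
      (if f' then
          (if !(PySem.Str.endswith (PySem.Str.strip l) ":") then
             PySem.Str.replace l label next_label
           else l)
        else l) :: goA label next_label f' ls

-- the per-line transform applied once the label has been seen
def trA (label next_label : String) (l : String) : String :=
  if !(PySem.Str.endswith (PySem.Str.strip l) ":") then PySem.Str.replace l label next_label else l

theorem foldl_eq_goA (label next_label : String) :
    ∀ (ls : List String) (found : Bool) (acc : List String),
      (ls.foldl (fun (st : Bool × List String) line =>
        let found_label := if PySem.Str.isIn (label ++ ":") line then true else st.1
        let line := if found_label then
            (if !(PySem.Str.endswith (PySem.Str.strip line) ":") then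
               PySem.Str.replace line label next_label
             else line)
          else line
        (found_label, st.2 ++ [line])) (found, acc)).2 = acc ++ goA label next_label found ls := by
  intro ls
  induction ls with
  | nil => intro found acc; simp [goA]
  | cons l ls ih =>
      intro found acc
      simp only [List.foldl_cons, goA]
      rw [ih]
      simp

theorem goA_true (label next_label : String) :
    ∀ ls : List String, goA label next_label true ls = ls.map (trA label next_label) := by
  intro ls
  induction ls with
  | nil => simp [goA]
  | cons l ls ih => simp [goA, trA, ih]

theorem map_enum_ge (label next_label : String) (idx : Int) :
    ∀ (ls : List String) (s : Int), idx ≤ s →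
      (PySem.List.enumerate ls s).map (fun q =>
          if idx ≤ q.1 && !(PySem.Str.endswith (PySem.Str.strip q.2) ":") then
            PySem.Str.replace q.2 label next_label
          else q.2) = ls.map (trA label next_label) := by
  intro ls
  induction ls with
  | nil => intro s _; simp [PySem.List.enumerate_nil]
  | cons l ls ih =>
      intro s hs
      rw [PySem.List.enumerate_cons, List.map_cons, ih (s + 1) (by omega)]
      refine congrArg (fun x => x :: ls.map (trA label next_label)) ?_
      have hd : decide (idx ≤ s) = true := decide_eq_true hs
      simp only [hd, Bool.true_and, trA]

theorem main_eq (label next_label : String) :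
    ∀ (ls : List String) (s : Int),
      (match (PySem.List.enumerate ls s).find? (fun p => PySem.Str.isIn (label ++ ":") p.2) with
       | none => ls
       | some p =>
          (PySem.List.enumerate ls s).map (fun q =>
            if p.1 ≤ q.1 && !(PySem.Str.endswith (PySem.Str.strip q.2) ":") then
              PySem.Str.replace q.2 label next_label
            else q.2)) = goA label next_label false ls := by
  intro ls
  induction ls with
  | nil => intro s; simp [PySem.List.enumerate_nil, goA]
  | cons l ls ih =>
      intro s
      rw [PySem.List.enumerate_cons]
      by_cases hp : PySem.Str.isIn (label ++ ":") l = true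
      · simp only [List.find?_cons, hp, goA]
        rw [List.map_cons]
        rw [map_enum_ge label next_label s ls (s + 1) (by omega)]
        simp [goA_true]
      · have hp' : PySem.Str.isIn (label ++ ":") l = false := by
          cases h : PySem.Str.isIn (label ++ ":") l
          · rfl
          · exact absurd h hp
        simp only [List.find?_cons, hp', goA, Bool.false_eq_true, if_false]
        cases hfind : (PySem.List.enumerate ls (s + 1)).find? (fun p => PySem.Str.isIn (label ++ ":") p.2) with
        | none =>
            have := ih (s + 1)
            rw [hfind] at this
            rw [← this]
        | some p =>
            have := ih (s + 1)
            rw [hfind] at this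
            -- p comes from enumerate ls (s+1), so s < p.1
            simp only
            have hmem : p ∈ PySem.List.enumerate ls (s + 1) := List.mem_of_find?_eq_some hfind
            obtain ⟨k, hk, hpk⟩ := (PySem.List.mem_enumerate_iff _ _ _).mp hmem
            have hgt : decide (p.1 ≤ s) = false := by subst hpk; simp; omega
            rw [List.map_cons, ← this]
            congr 1
            simp [hgt]

-- ===== VERDICT (by name: the statement is the Claim_ definition above) =====
theorem update_labels_after_spec : Claim_equal_update_labels_after := by
  intro asm_code label next_label _
  unfold Spec_update_labels_after update_labels_after update_labels_after_alt
  rw [foldl_eq_goA]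
  rw [← main_eq label next_label asm_code 0]
  rfl
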